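-- pv_equiv track=rewrite | github.com/GulfGate231/emailverifier | email_verifier_gui_fast.py | get_typo_suggestion
-- ===== SOURCE A (Python) =====
-- TYPO_CORRECTIONS = {
--     'gamil.com': 'gmail.com', 'gmial.com': 'gmail.com', 'gmai.com': 'gmail.com',
--     'hotmial.com': 'hotmail.com', 'hotmai.com': 'hotmail.com',
--     'yaho.com': 'yahoo.com', 'yahhoo.com': 'yahoo.com',
--     'outllok.com': 'outlook.com', 'outlok.com': 'outlook.com',
-- }
--
-- POPULAR_DOMAINS = ['gmail.com', 'yahoo.com', 'hotmail.com', 'outlook.com', 'icloud.com', 'protonmail.com']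
--
-- def levenshtein(a, b):
--     if len(a) < len(b): return levenshtein(b, a)
--     if len(b) == 0: return len(a)
--     prev = list(range(len(b) + 1))
--     for i, c1 in enumerate(a):
--         curr = [i + 1]
--         for j, c2 in enumerate(b):
--             curr.append(min(curr[-1] + 1, prev[j + 1] + 1, prev[j] + (c1 != c2)))
--         prev = curr
--     return prev[-1]
--
-- def get_typo_suggestion(domain):
--     domain = domain.lower()
--     if domain in TYPO_CORRECTIONS:
--         return TYPO_CORRECTIONS[domain]
--     for pop in POPULAR_DOMAINS:
--         if levenshtein(domain, pop) <= 1: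
--             return pop
--     return None
-- ===== SOURCE B (Python) =====
-- TYPO_CORRECTIONS = {
--     'gamil.com': 'gmail.com', 'gmial.com': 'gmail.com', 'gmai.com': 'gmail.com',
--     'hotmial.com': 'hotmail.com', 'hotmai.com': 'hotmail.com',
--     'yaho.com': 'yahoo.com', 'yahhoo.com': 'yahoo.com',
--     'outllok.com': 'outlook.com', 'outlok.com': 'outlook.com',
-- }
--
-- POPULAR_DOMAINS = ['gmail.com', 'yahoo.com', 'hotmail.com', 'outlook.com', 'icloud.com', 'protonmail.com']
--
-- def _one_edit(a, b):
--     # True iff the edit distance between a and b is at most 1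
--     if len(a) < len(b):
--         a, b = b, a
--     if len(a) - len(b) > 1:
--         return False
--     if len(a) == len(b):
--         return sum(1 for x, y in zip(a, b) if x != y) <= 1
--     # len(a) == len(b) + 1: b must be a with exactly one character removed
--     for i in range(len(b)):
--         if a[i] != b[i]:
--             return a[i+1:] == b[i:]
--     return True
--
-- def get_typo_suggestion(domain):
--     domain = domain.lower()
--     if domain in TYPO_CORRECTIONS:
--         return TYPO_CORRECTIONS[domain]
--     return next((p for p in POPULAR_DOMAINS if _one_edit(domain, p)), None)
-- ===== Notes on version B (the rewrite author's own statement) =====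
-- stated objective: faster
-- what changed: The O(len(domain)*len(pop)) Levenshtein dynamic-programming table used for the distance<=1 test is replaced by a linear one-edit structural comparison: a length-gap check, a mismatch count over zip for equal lengths, and a single one-skip scan when lengths differ by one.
import Mathlib
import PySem

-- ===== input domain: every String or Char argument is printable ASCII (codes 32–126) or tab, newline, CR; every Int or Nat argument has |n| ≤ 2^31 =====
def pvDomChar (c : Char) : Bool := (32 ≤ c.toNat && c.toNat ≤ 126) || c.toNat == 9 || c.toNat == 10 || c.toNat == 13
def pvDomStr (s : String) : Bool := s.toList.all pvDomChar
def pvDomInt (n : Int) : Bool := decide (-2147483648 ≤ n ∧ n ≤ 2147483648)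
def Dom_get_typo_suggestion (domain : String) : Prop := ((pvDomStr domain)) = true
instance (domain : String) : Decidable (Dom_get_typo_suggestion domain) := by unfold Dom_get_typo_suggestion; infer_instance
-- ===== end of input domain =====

-- B replaces the quadratic Levenshtein dynamic program of A by a linear one-edit
-- structural comparison (length gap check, mismatch count, one-skip scan).

-- shared module-level data (TYPO_CORRECTIONS / POPULAR_DOMAINS)
def pvTypoCorrections : PySem.Dict String String := PySem.Dict.ofList
  [("gamil.com", "gmail.com"), ("gmial.com", "gmail.com"), ("gmai.com", "gmail.com"),
   ("hotmial.com", "hotmail.com"), ("hotmai.com", "hotmail.com"),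
   ("yaho.com", "yahoo.com"), ("yahhoo.com", "yahoo.com"),
   ("outllok.com", "outlook.com"), ("outlok.com", "outlook.com")]

def pvPopularDomains : List String := ["gmail.com", "yahoo.com", "hotmail.com", "outlook.com", "icloud.com", "protonmail.com"]

-- ===== PORT A =====
-- levenshtein(a, b): the two-row dynamic program, transliterated (rows are lists of Nat;
-- all DP entries are nonnegative Python ints). prev[j]/prev[j+1]/curr[-1] are in range
-- whenever Python reads them, so pyGetD with default 0 is exact.
def pvLevenshtein (a b : List Char) : Nat :=
  if a.length < b.length then pvLevenshtein b a
  else if b.length = 0 then a.length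
  else
    let prev0 := List.range (b.length + 1)
    let prev :=
      (PySem.List.enumerate a).foldl (fun prev ic =>
        (PySem.List.enumerate b).foldl (fun curr jc =>
          curr ++ [min (min (PySem.List.pyGetD curr (-1) 0 + 1)
                            (PySem.List.pyGetD prev (jc.1 + 1) 0 + 1))
                       (PySem.List.pyGetD prev jc.1 0 + (if ic.2 ≠ jc.2 then 1 else 0))])
          [(ic.1).toNat + 1]) prev0
    PySem.List.pyGetD prev (-1) 0
termination_by b.length
decreasing_by simpa using ‹a.length < b.length›

def pvLoopA (d : List Char) : List String → Option String
  | [] => none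
  | p :: ps => if pvLevenshtein d p.toList ≤ 1 then some p else pvLoopA d ps

def get_typo_suggestion (domain : String) : Option String :=
  let d := PySem.Str.lower domain
  if pvTypoCorrections.contains d then pvTypoCorrections.get? d
  else pvLoopA d.toList pvPopularDomains

-- ===== PORT B =====
-- sum(1 for x, y in zip(a, b) if x != y)
def pvMismatches (a b : List Char) : Nat := (a.zip b).countP (fun p => p.1 ≠ p.2)

-- the one-skip scan of _one_edit (index loop; a[i]/b[i] are in range whenever Python
-- reads them, so getD is exact; the nonnegative slices a[i+1:], b[i:] are drops)
def pvSkipScan (a b : List Char) (i : Nat) : Bool :=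
  if i < b.length then
    if a.getD i ' ' ≠ b.getD i ' ' then a.drop (i + 1) == b.drop i
    else pvSkipScan a b (i + 1)
  else true
termination_by b.length - i

-- _one_edit(a, b)
def pvOneEdit (a b : List Char) : Bool :=
  let ab := if a.length < b.length then (b, a) else (a, b)
  if ab.2.length + 1 < ab.1.length then false
  else if ab.1.length = ab.2.length then pvMismatches ab.1 ab.2 ≤ 1
  else pvSkipScan ab.1 ab.2 0

def get_typo_suggestion_alt (domain : String) : Option String :=
  let d := PySem.Str.lower domain
  if pvTypoCorrections.contains d then pvTypoCorrections.get? d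
  else pvPopularDomains.find? (fun p => pvOneEdit d.toList p.toList)

-- ===== PRECONDITION & SPEC =====
def Spec_get_typo_suggestion (domain : String) (out : Option String) : Prop := out = get_typo_suggestion_alt domain
instance (domain : String) (out : Option String) : Decidable (Spec_get_typo_suggestion domain out) := by unfold Spec_get_typo_suggestion; infer_instance

-- ===== CLAIM (what is proved, stated in full; the proofs are below) =====
def Claim_equal_get_typo_suggestion : Prop := ∀ (domain : String), Dom_get_typo_suggestion domain → Spec_get_typo_suggestion domain (get_typo_suggestion domain)

-- ===== LEMMAS AND PROOFS =====

-- reference edit distance, recursing on the FRONT characters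
def pvLevF : List Char → List Char → Nat
  | [], b => b.length
  | x :: a, [] => (x :: a).length
  | x :: a, y :: b =>
      if x = y then pvLevF a b
      else 1 + min (min (pvLevF a (y :: b)) (pvLevF (x :: a) b)) (pvLevF a b)
termination_by a b => a.length + b.length

-- "a and b are within one edit": equality, one substitution, or one deletion either way
def pvE1 (a b : List Char) : Prop :=
  a = b ∨ (∃ p c d q, a = p ++ c :: q ∧ b = p ++ d :: q)
    ∨ (∃ p c q, a = p ++ c :: q ∧ b = p ++ q)
    ∨ (∃ p c q, b = p ++ c :: q ∧ a = p ++ q)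

lemma pvLevF_nil_right (a : List Char) : pvLevF a [] = a.length := by
  cases a <;> simp [pvLevF]

lemma pvLevF_nil_left (b : List Char) : pvLevF [] b = b.length := by
  simp [pvLevF]

lemma pvLevF_cons_cons (x y : Char) (a b : List Char) :
    pvLevF (x :: a) (y :: b) =
      if x = y then pvLevF a b
      else 1 + min (min (pvLevF a (y :: b)) (pvLevF (x :: a) b)) (pvLevF a b) := by
  simp only [pvLevF]

lemma pvLevF_len_aux : ∀ (n : Nat) (a b : List Char), a.length + b.length ≤ n →
    a.length ≤ pvLevF a b + b.length ∧ b.length ≤ pvLevF a b + a.length := by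
  intro n
  induction n with
  | zero => intro a b h; cases a <;> cases b <;> simp_all [pvLevF]
  | succ n ih =>
    intro a b h
    cases a with
    | nil => simp [pvLevF_nil_left]
    | cons x a =>
      cases b with
      | nil => rw [pvLevF_nil_right]; simp
      | cons y b =>
        rw [pvLevF_cons_cons]
        by_cases hxy : x = y
        · have := ih a b (by simp at h ⊢; omega)
          simp only [if_pos hxy, List.length_cons]
          omega
        · have h1 := ih a (y :: b) (by simp at h ⊢; omega)
          have h2 := ih (x :: a) b (by simp at h ⊢; omega)
          have h3 := ih a b (by simp at h ⊢; omega)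
          simp only [if_neg hxy, List.length_cons] at *
          omega

lemma pvLevF_len (a b : List Char) :
    a.length ≤ pvLevF a b + b.length ∧ b.length ≤ pvLevF a b + a.length :=
  pvLevF_len_aux (a.length + b.length) a b le_rfl

lemma pvLevF_symm_aux : ∀ (n : Nat) (a b : List Char), a.length + b.length ≤ n →
    pvLevF a b = pvLevF b a := by
  intro n
  induction n with
  | zero => intro a b h; cases a <;> cases b <;> simp_all [pvLevF]
  | succ n ih =>
    intro a b h
    cases a with
    | nil => cases b <;> simp [pvLevF_nil_left, pvLevF_nil_right]
    | cons x a =>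
      cases b with
      | nil => simp [pvLevF_nil_left, pvLevF_nil_right]
      | cons y b =>
        rw [pvLevF_cons_cons, pvLevF_cons_cons]
        by_cases hxy : x = y
        · subst hxy
          rw [if_pos rfl, if_pos rfl]
          exact ih a b (by simp at h ⊢; omega)
        · have hyx : ¬ y = x := fun hh => hxy hh.symm
          have h1 := ih a (y :: b) (by simp at h ⊢; omega)
          have h2 := ih (x :: a) b (by simp at h ⊢; omega)
          have h3 := ih a b (by simp at h ⊢; omega)
          simp only [if_neg hxy, if_neg hyx]
          omega

lemma pvLevF_symm (a b : List Char) : pvLevF a b = pvLevF b a :=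
  pvLevF_symm_aux (a.length + b.length) a b le_rfl

lemma pvLevF_adj_aux : ∀ (n : Nat) (a b : List Char) (d : Char), a.length + b.length ≤ n →
    (pvLevF a b ≤ pvLevF a (d :: b) + 1 ∧ pvLevF a (d :: b) ≤ pvLevF a b + 1) ∧
    (pvLevF a b ≤ pvLevF (d :: a) b + 1 ∧ pvLevF (d :: a) b ≤ pvLevF a b + 1) := by
  intro n
  induction n with
  | zero => intro a b d h; cases a <;> cases b <;> simp_all [pvLevF]
  | succ n ih =>
    intro a b d h
    cases a with
    | nil =>
      cases b with
      | nil => simp [pvLevF]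
      | cons y b' =>
        constructor
        · simp [pvLevF_nil_left]
        · rw [pvLevF_cons_cons]
          by_cases hdy : d = y
          · simp [if_pos hdy, pvLevF_nil_left]; omega
          · have hlen := pvLevF_len [d] b'
            simp only [if_neg hdy, pvLevF_nil_left, List.length_cons,
              List.length_nil] at *
            omega
    | cons x a' =>
      cases b with
      | nil =>
        constructor
        · rw [pvLevF_cons_cons, pvLevF_nil_right]
          by_cases hxd : x = d
          · simp [if_pos hxd, pvLevF_nil_right]; omega
          · have hlen := pvLevF_len a' [d]
            simp only [if_neg hxd, pvLevF_nil_right, List.length_cons,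
              List.length_nil] at *
            omega
        · rw [pvLevF_nil_right, pvLevF_nil_right]; simp
      | cons y b' =>
        have hab : a'.length + (y :: b').length ≤ n := by simp at h ⊢; omega
        have hab2 : (x :: a').length + b'.length ≤ n := by simp at h ⊢; omega
        constructor
        · rw [pvLevF_cons_cons (x := x) (y := d)]
          by_cases hxd : x = d
          · have hL := (ih a' (y :: b') x hab).2
            subst hxd
            rw [if_pos rfl]
            omega
          · have h1 := (ih a' (y :: b') d hab).1
            have h2 := (ih a' (y :: b') x hab).2
            simp only [if_neg hxd]
            omega
        · rw [pvLevF_cons_cons (x := d) (y := y)]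
          by_cases hdy : d = y
          · have hR := (ih (x :: a') b' d hab2).1
            subst hdy
            rw [if_pos rfl]
            omega
          · have h1 := (ih (x :: a') b' y hab2).1
            have h2 := (ih (x :: a') b' d hab2).2
            simp only [if_neg hdy]
            omega

lemma pvLevF_adj (a b : List Char) (d : Char) :
    (pvLevF a b ≤ pvLevF a (d :: b) + 1 ∧ pvLevF a (d :: b) ≤ pvLevF a b + 1) ∧
    (pvLevF a b ≤ pvLevF (d :: a) b + 1 ∧ pvLevF (d :: a) b ≤ pvLevF a b + 1) :=
  pvLevF_adj_aux (a.length + b.length) a b d le_rfl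

lemma pvLevF_cell (x y : List Char) (c d : Char) :
    pvLevF (c :: x) (d :: y) =
      min (min (pvLevF (c :: x) y + 1) (pvLevF x (d :: y) + 1))
          (pvLevF x y + (if c ≠ d then 1 else 0)) := by
  rw [pvLevF_cons_cons]
  have h1 := (pvLevF_adj x y c).2.1
  have h2 := (pvLevF_adj x y d).1.1
  split_ifs with hcd <;> simp_all <;> omega

lemma pvLevF_eq_zero (a b : List Char) : pvLevF a b = 0 ↔ a = b := by
  induction a generalizing b with
  | nil =>
    rw [pvLevF_nil_left]
    constructor
    · intro h; exact (List.length_eq_zero_iff.mp h).symm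
    · intro h; simp [← h]
  | cons x a ih =>
    cases b with
    | nil => rw [pvLevF_nil_right]; simp
    | cons y b =>
      rw [pvLevF_cons_cons]
      by_cases hxy : x = y
      · subst hxy; simp [ih b]
      · simp only [if_neg hxy]
        constructor
        · intro h; omega
        · intro h; injection h with h1 _; exact absurd h1 hxy

-- "b is a with one character deleted" is invariant under removing a common head
lemma pvDel_cons (x : Char) (a b : List Char) :
    (∃ p c q, x :: a = p ++ c :: q ∧ x :: b = p ++ q) ↔
    (∃ p c q, a = p ++ c :: q ∧ b = p ++ q) := by
  constructor
  · rintro ⟨p, c, q, h1, h2⟩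
    cases p with
    | nil =>
      simp only [List.nil_append] at h1 h2
      injection h1 with hc hq
      exact ⟨[], x, b, by simp [hq, ← h2], by simp⟩
    | cons z p' =>
      simp only [List.cons_append] at h1 h2
      injection h1 with _ h1'
      injection h2 with _ h2'
      exact ⟨p', c, q, h1', h2'⟩
  · rintro ⟨p, c, q, h1, h2⟩
    exact ⟨x :: p, c, q, by simp [h1], by simp [h2]⟩

lemma pvE1_cons (x : Char) (a b : List Char) : pvE1 (x :: a) (x :: b) ↔ pvE1 a b := by
  constructor
  · rintro (h | ⟨p, c, d, q, h1, h2⟩ | h | h)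
    · left; injection h
    · cases p with
      | nil =>
        simp only [List.nil_append] at h1 h2
        injection h1 with _ hq1
        injection h2 with _ hq2
        left; rw [hq1, hq2]
      | cons z p' =>
        simp only [List.cons_append] at h1 h2
        injection h1 with _ h1'
        injection h2 with _ h2'
        right; left; exact ⟨p', c, d, q, h1', h2'⟩
    · right; right; left; exact (pvDel_cons x a b).mp h
    · right; right; right; exact (pvDel_cons x b a).mp h
  · rintro (h | ⟨p, c, d, q, h1, h2⟩ | ⟨p, c, q, h1, h2⟩ | ⟨p, c, q, h1, h2⟩)
    · left; rw [h]
    · right; left; exact ⟨x :: p, c, d, q, by simp [h1], by simp [h2]⟩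
    · right; right; left; exact (pvDel_cons x a b).mpr ⟨p, c, q, h1, h2⟩
    · right; right; right; exact (pvDel_cons x b a).mpr ⟨p, c, q, h1, h2⟩

lemma pvLevF_le_one_iff (a b : List Char) : pvLevF a b ≤ 1 ↔ pvE1 a b := by
  induction a generalizing b with
  | nil =>
    rw [pvLevF_nil_left]
    constructor
    · intro h
      cases b with
      | nil => left; rfl
      | cons c t =>
        cases t with
        | nil => right; right; right; exact ⟨[], c, [], rfl, rfl⟩
        | cons d t' => exact absurd h (by simp)
    · rintro (h | ⟨p, c, d, q, h1, h2⟩ | ⟨p, c, q, h1, h2⟩ | ⟨p, c, q, h1, h2⟩)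
      · simp [← h]
      · exact absurd h1 (by simp)
      · exact absurd h1 (by simp)
      · obtain ⟨hp, hq⟩ := List.append_eq_nil_iff.mp h2.symm
        subst hp; subst hq; simp [h1]
  | cons x a ih =>
    cases b with
    | nil =>
      rw [pvLevF_nil_right]
      constructor
      · intro h
        have ha : a = [] := by
          rw [List.length_cons] at h
          exact List.length_eq_zero_iff.mp (by omega)
        subst ha
        right; right; left; exact ⟨[], x, [], rfl, rfl⟩
      · rintro (h | ⟨p, c, d, q, h1, h2⟩ | ⟨p, c, q, h1, h2⟩ | ⟨p, c, q, h1, h2⟩)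
        · exact absurd h (by simp)
        · exact absurd h2 (by simp)
        · obtain ⟨hp, hq⟩ := List.append_eq_nil_iff.mp h2.symm
          subst hp; subst hq
          simp only [List.nil_append] at h1
          injection h1 with _ h1'
          simp [h1']
        · exact absurd h1 (by simp)
    | cons y b =>
      rw [pvLevF_cons_cons]
      by_cases hxy : x = y
      · subst hxy; rw [if_pos rfl, ih b, pvE1_cons]
      · rw [if_neg hxy]
        constructor
        · intro h
          have hmin : min (min (pvLevF a (y :: b)) (pvLevF (x :: a) b)) (pvLevF a b) = 0 := by
            omega
          rcases Nat.min_eq_zero_iff.mp hmin with hm | hm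
          · rcases Nat.min_eq_zero_iff.mp hm with hm' | hm'
            · -- a = y :: b : x was inserted in front
              right; right; left
              exact ⟨[], x, y :: b, by simp [(pvLevF_eq_zero _ _).mp hm'], rfl⟩
            · -- x :: a = b : y was inserted in front
              right; right; right
              exact ⟨[], y, x :: a, by simp [← (pvLevF_eq_zero _ _).mp hm'], rfl⟩
          · -- a = b : substitution at the front
            right; left
            exact ⟨[], x, y, a, rfl, by simp [← (pvLevF_eq_zero _ _).mp hm]⟩
        · rintro (h | ⟨p, c, d, q, h1, h2⟩ | ⟨p, c, q, h1, h2⟩ | ⟨p, c, q, h1, h2⟩)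
          · injection h with h1 _; exact absurd h1 hxy
          · cases p with
            | nil =>
              simp only [List.nil_append] at h1 h2
              injection h1 with _ hq1
              injection h2 with _ hq2
              have : pvLevF a b = 0 := (pvLevF_eq_zero a b).mpr (by rw [hq1, hq2])
              omega
            | cons z p' =>
              simp only [List.cons_append] at h1 h2
              injection h1 with he1 _
              injection h2 with he2 _
              exact absurd (he1.trans he2.symm) hxy
          · cases p with
            | nil =>
              simp only [List.nil_append] at h1 h2
              injection h1 with _ hq1
              have : pvLevF a (y :: b) = 0 := (pvLevF_eq_zero _ _).mpr (by rw [hq1, ← h2])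
              omega
            | cons z p' =>
              simp only [List.cons_append] at h1 h2
              injection h1 with he1 _
              injection h2 with he2 _
              exact absurd (he1.trans he2.symm) hxy
          · cases p with
            | nil =>
              simp only [List.nil_append] at h1 h2
              injection h1 with _ hq1
              have : pvLevF (x :: a) b = 0 := (pvLevF_eq_zero _ _).mpr (by rw [hq1]; exact h2)
              omega
            | cons z p' =>
              simp only [List.cons_append] at h1 h2
              injection h1 with he1 _
              injection h2 with he2 _
              exact absurd (he2.trans he1.symm) hxy
lemma pvE1_rev_of (a b : List Char) (h : pvE1 a b) : pvE1 a.reverse b.reverse := by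
  rcases h with h | ⟨p, c, d, q, h1, h2⟩ | ⟨p, c, q, h1, h2⟩ | ⟨p, c, q, h1, h2⟩
  · left; rw [h]
  · right; left
    exact ⟨q.reverse, c, d, p.reverse, by rw [h1]; simp, by rw [h2]; simp⟩
  · right; right; left
    exact ⟨q.reverse, c, p.reverse, by rw [h1]; simp, by rw [h2]; simp⟩
  · right; right; right
    exact ⟨q.reverse, c, p.reverse, by rw [h1]; simp, by rw [h2]; simp⟩

lemma pvE1_rev (a b : List Char) : pvE1 a b ↔ pvE1 a.reverse b.reverse := by
  constructor
  · exact pvE1_rev_of a b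
  · intro h
    have := pvE1_rev_of _ _ h
    simpa using this

lemma pvE1_swap_of (a b : List Char) (h : pvE1 a b) : pvE1 b a := by
  rcases h with h | ⟨p, c, d, q, h1, h2⟩ | ⟨p, c, q, h1, h2⟩ | ⟨p, c, q, h1, h2⟩
  · left; rw [h]
  · right; left; exact ⟨p, d, c, q, h2, h1⟩
  · right; right; right; exact ⟨p, c, q, h1, h2⟩
  · right; right; left; exact ⟨p, c, q, h1, h2⟩

lemma pvE1_swap (a b : List Char) : pvE1 a b ↔ pvE1 b a :=
  ⟨pvE1_swap_of a b, pvE1_swap_of b a⟩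

-- DP correctness
def pvL (a b : List Char) : Nat := pvLevF a.reverse b.reverse

lemma pvL_nil_left (b : List Char) : pvL [] b = b.length := by
  simp [pvL, pvLevF_nil_left]

lemma pvL_nil_right (a : List Char) : pvL a [] = a.length := by
  simp [pvL, pvLevF_nil_right]

lemma pvL_symm (a b : List Char) : pvL a b = pvL b a := pvLevF_symm _ _

lemma pvL_cell (u v : List Char) (c d : Char) :
    pvL (u ++ [c]) (v ++ [d]) =
      min (min (pvL (u ++ [c]) v + 1) (pvL u (v ++ [d]) + 1))
          (pvL u v + (if c ≠ d then 1 else 0)) := by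
  unfold pvL
  rw [List.reverse_append, List.reverse_append]
  simp only [List.reverse_singleton, List.singleton_append]
  exact pvLevF_cell u.reverse v.reverse c d

-- the DP inner loop builds the next row of prefix distances
lemma pvRow (bfull : List Char) (u : List Char) (c1 : Char)
    (prev : List Nat)
    (hprev : prev = (List.range (bfull.length + 1)).map (fun j => pvL u (bfull.take j))) :
    ∀ (bs : List Char) (j0 : Nat), j0 ≤ bfull.length → bfull.drop j0 = bs →
    (PySem.List.enumerate bs (j0 : Int)).foldl
      (fun curr jc =>
        curr ++ [min (min (PySem.List.pyGetD curr (-1) 0 + 1)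
                          (PySem.List.pyGetD prev (jc.1 + 1) 0 + 1))
                     (PySem.List.pyGetD prev jc.1 0 + (if c1 ≠ jc.2 then 1 else 0))])
      ((List.range (j0 + 1)).map (fun j => pvL (u ++ [c1]) (bfull.take j)))
    = (List.range (bfull.length + 1)).map (fun j => pvL (u ++ [c1]) (bfull.take j)) := by
  intro bs
  induction bs with
  | nil =>
    intro j0 hj0 hdrop
    have hlen : bfull.length ≤ j0 := List.drop_eq_nil_iff.mp hdrop
    have : j0 = bfull.length := le_antisymm hj0 hlen
    subst this
    simp [PySem.List.enumerate]
  | cons c2 bs' ih =>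
    intro j0 hj0 hdrop
    have hj0lt : j0 < bfull.length := by
      have := congrArg List.length hdrop
      simp [List.length_drop] at this
      omega
    have hget : bfull[j0]? = some c2 := by
      have h0 : (bfull.drop j0)[0]? = some c2 := by rw [hdrop]; rfl
      rw [List.getElem?_drop] at h0
      simpa using h0
    have htake : bfull.take (j0 + 1) = bfull.take j0 ++ [c2] := by
      rw [List.take_add_one, hget]; rfl
    rw [PySem.List.enumerate_cons, List.foldl_cons]
    dsimp only
    have hcast : (j0 : Int) + 1 = ((j0 + 1 : Nat) : Int) := by push_cast; ring
    have hstep :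
        ((List.range (j0 + 1)).map (fun j => pvL (u ++ [c1]) (bfull.take j))) ++
          [min (min (PySem.List.pyGetD ((List.range (j0 + 1)).map (fun j => pvL (u ++ [c1]) (bfull.take j))) (-1) 0 + 1)
                    (PySem.List.pyGetD prev ((j0 : Int) + 1) 0 + 1))
               (PySem.List.pyGetD prev (j0 : Int) 0 + (if c1 ≠ c2 then 1 else 0))]
        = (List.range (j0 + 1 + 1)).map (fun j => pvL (u ++ [c1]) (bfull.take j)) := by
      have hlast : PySem.List.pyGetD ((List.range (j0 + 1)).map (fun j => pvL (u ++ [c1]) (bfull.take j))) (-1) 0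
          = pvL (u ++ [c1]) (bfull.take j0) := by
        rw [List.range_succ, List.map_append]
        exact PySem.List.pyGetD_neg_one_append_singleton _ _ _
      have hp1 : PySem.List.pyGetD prev ((j0 : Int) + 1) 0 = pvL u (bfull.take (j0 + 1)) := by
        rw [hcast, PySem.List.pyGetD_natCast, hprev]
        exact PySem.List.getD_map_range _ _ _ _ (by omega)
      have hp0 : PySem.List.pyGetD prev (j0 : Int) 0 = pvL u (bfull.take j0) := by
        rw [PySem.List.pyGetD_natCast, hprev]
        exact PySem.List.getD_map_range _ _ _ _ (by omega)
      rw [hlast, hp1, hp0]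
      rw [List.range_succ (n := j0 + 1), List.map_append]
      congr 1
      simp only [List.map_cons, List.map_nil]
      congr 1
      rw [htake, pvL_cell]
    rw [hstep, hcast]
    refine ih (j0 + 1) (by omega) ?_
    have : bfull.drop (j0 + 1) = (bfull.drop j0).drop 1 := by
      rw [List.drop_drop]
    rw [this, hdrop]
    rfl

-- the DP outer loop turns the row for a processed prefix into the row for all of afull
lemma pvTable (afull bfull : List Char) :
    ∀ (as : List Char) (i0 : Nat), i0 ≤ afull.length → afull.drop i0 = as →
    (PySem.List.enumerate as (i0 : Int)).foldl
      (fun prev ic =>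
        (PySem.List.enumerate bfull).foldl (fun curr jc =>
          curr ++ [min (min (PySem.List.pyGetD curr (-1) 0 + 1)
                            (PySem.List.pyGetD prev (jc.1 + 1) 0 + 1))
                       (PySem.List.pyGetD prev jc.1 0 + (if ic.2 ≠ jc.2 then 1 else 0))])
          [(ic.1).toNat + 1])
      ((List.range (bfull.length + 1)).map (fun j => pvL (afull.take i0) (bfull.take j)))
    = (List.range (bfull.length + 1)).map (fun j => pvL afull (bfull.take j)) := by
  intro as
  induction as with
  | nil =>
    intro i0 hi0 hdrop
    have hlen : afull.length ≤ i0 := List.drop_eq_nil_iff.mp hdrop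
    have : i0 = afull.length := le_antisymm hi0 hlen
    subst this
    simp [PySem.List.enumerate]
  | cons c1 as' ih =>
    intro i0 hi0 hdrop
    have hi0lt : i0 < afull.length := by
      have := congrArg List.length hdrop
      simp [List.length_drop] at this
      omega
    have hget : afull[i0]? = some c1 := by
      have h0 : (afull.drop i0)[0]? = some c1 := by rw [hdrop]; rfl
      rw [List.getElem?_drop] at h0
      simpa using h0
    have htake : afull.take (i0 + 1) = afull.take i0 ++ [c1] := by
      rw [List.take_add_one, hget]; rfl
    rw [PySem.List.enumerate_cons, List.foldl_cons]
    dsimp only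
    have hlen0 : ((afull.take i0) ++ [c1]).length = i0 + 1 := by
      simp [List.length_take]
      omega
    have hinit : [((i0 : Int)).toNat + 1] =
        (List.range (0 + 1)).map (fun j => pvL (afull.take i0 ++ [c1]) (bfull.take j)) := by
      simp only [Nat.zero_add, List.range_one, List.map_cons, List.map_nil, List.take_zero,
        pvL_nil_right, hlen0, Int.toNat_natCast]
    have hrow := pvRow bfull (afull.take i0) c1
      ((List.range (bfull.length + 1)).map (fun j => pvL (afull.take i0) (bfull.take j))) rfl
      bfull 0 (by omega) rfl
    have hcast0 : PySem.List.enumerate bfull = PySem.List.enumerate bfull ((0 : Nat) : Int) := by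
      norm_num
    have hstep :
        (PySem.List.enumerate bfull).foldl
          (fun curr jc =>
            curr ++ [min (min (PySem.List.pyGetD curr (-1) 0 + 1)
                              (PySem.List.pyGetD ((List.range (bfull.length + 1)).map (fun j => pvL (afull.take i0) (bfull.take j))) (jc.1 + 1) 0 + 1))
                         (PySem.List.pyGetD ((List.range (bfull.length + 1)).map (fun j => pvL (afull.take i0) (bfull.take j))) jc.1 0 + (if c1 ≠ jc.2 then 1 else 0))])
          [((i0 : Int)).toNat + 1]
        = (List.range (bfull.length + 1)).map (fun j => pvL (afull.take (i0 + 1)) (bfull.take j)) := by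
      rw [hinit, hcast0]
      simp only [htake]
      exact hrow
    rw [hstep]
    have hcast : (i0 : Int) + 1 = ((i0 + 1 : Nat) : Int) := by push_cast; ring
    rw [hcast]
    refine ih (i0 + 1) (by omega) ?_
    have : afull.drop (i0 + 1) = (afull.drop i0).drop 1 := by rw [List.drop_drop]
    rw [this, hdrop]
    rfl

lemma pvLev_eq_main (a b : List Char) (h : b.length ≤ a.length) :
    pvLevenshtein a b = pvL a b := by
  rw [pvLevenshtein]
  rw [if_neg (by omega : ¬ a.length < b.length)]
  by_cases hb : b.length = 0
  · rw [if_pos hb]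
    have : b = [] := List.length_eq_zero_iff.mp hb
    subst this
    rw [pvL_nil_right]
  · rw [if_neg hb]
    dsimp only
    have hinit : List.range (b.length + 1) =
        (List.range (b.length + 1)).map (fun j => pvL (a.take 0) (b.take j)) := by
      apply List.ext_getElem (by simp)
      intro i h1 h2
      simp only [List.getElem_map, List.getElem_range, List.take_zero, pvL_nil_left,
        List.length_take]
      simp at h1
      omega
    have htab := pvTable a b a 0 (by omega) rfl
    have hcast0 : PySem.List.enumerate a = PySem.List.enumerate a ((0 : Nat) : Int) := by
      norm_num
    rw [hinit, hcast0, htab]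
    rw [List.range_succ, List.map_append]
    simp only [List.map_cons, List.map_nil]
    rw [PySem.List.pyGetD_neg_one_append_singleton]
    rw [List.take_length]

lemma pvLev_eq_pvL (a b : List Char) : pvLevenshtein a b = pvL a b := by
  rcases Nat.lt_or_ge a.length b.length with hlt | hge
  · rw [pvLevenshtein, if_pos hlt, pvLev_eq_main b a (le_of_lt hlt), pvL_symm]
  · exact pvLev_eq_main a b hge

lemma pvLev_le_one_iff (a b : List Char) : pvLevenshtein a b ≤ 1 ↔ pvE1 a b := by
  rw [pvLev_eq_pvL]
  unfold pvL
  rw [pvLevF_le_one_iff, ← pvE1_rev]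

-- B-side characterisation
lemma pvE1_len (a b : List Char) (h : pvE1 a b) :
    a.length ≤ b.length + 1 ∧ b.length ≤ a.length + 1 := by
  rcases h with h | ⟨p, c, d, q, h1, h2⟩ | ⟨p, c, q, h1, h2⟩ | ⟨p, c, q, h1, h2⟩
  · subst h; omega
  · subst h1; subst h2; simp
  · subst h1; subst h2; simp; omega
  · subst h1; subst h2; simp; omega

lemma pvMismatches_cons (x y : Char) (a b : List Char) :
    pvMismatches (x :: a) (y :: b) = pvMismatches a b + (if x = y then 0 else 1) := by
  simp only [pvMismatches, List.zip_cons_cons, List.countP_cons]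
  by_cases hxy : x = y <;> simp [hxy]

lemma pvMismatches_eq_zero (a b : List Char) (h : a.length = b.length) :
    pvMismatches a b = 0 ↔ a = b := by
  induction a generalizing b with
  | nil =>
    have : b = [] := List.length_eq_zero_iff.mp (by simpa using h.symm)
    subst this
    simp [pvMismatches]
  | cons x a ih =>
    cases b with
    | nil => simp at h
    | cons y b =>
      rw [pvMismatches_cons]
      by_cases hxy : x = y
      · subst hxy; simp [ih b (by simpa using h)]
      · simp only [if_neg hxy]
        constructor
        · intro hc; omega
        · intro hc; injection hc with h1 _; exact absurd h1 hxy

-- with equal lengths and differing heads, "within one edit" means equal tails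
lemma pvE1_eqlen_ne (x y : Char) (a b : List Char) (h : a.length = b.length)
    (hxy : x ≠ y) : pvE1 (x :: a) (y :: b) ↔ a = b := by
  constructor
  · rintro (hh | ⟨p, c, d, q, h1, h2⟩ | ⟨p, c, q, h1, h2⟩ | ⟨p, c, q, h1, h2⟩)
    · injection hh
    · cases p with
      | nil =>
        simp only [List.nil_append] at h1 h2
        injection h1 with _ hq1
        injection h2 with _ hq2
        rw [hq1, hq2]
      | cons z p' =>
        simp only [List.cons_append] at h1 h2
        injection h1 with he1 _
        injection h2 with he2 _
        exact absurd (he1.trans he2.symm) hxy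
    · have l1 := congrArg List.length h1
      have l2 := congrArg List.length h2
      simp at l1 l2
      omega
    · have l1 := congrArg List.length h1
      have l2 := congrArg List.length h2
      simp at l1 l2
      omega
  · intro hh
    right; left
    exact ⟨[], x, y, a, rfl, by simp [hh]⟩

lemma pvMismatches_iff (a b : List Char) (h : a.length = b.length) :
    pvMismatches a b ≤ 1 ↔ pvE1 a b := by
  induction a generalizing b with
  | nil =>
    have : b = [] := List.length_eq_zero_iff.mp (by simpa using h.symm)
    subst this
    simp [pvMismatches, pvE1]
  | cons x a ih =>
    cases b with
    | nil => simp at h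
    | cons y b =>
      rw [pvMismatches_cons]
      by_cases hxy : x = y
      · subst hxy
        rw [pvE1_cons]
        simpa using ih b (by simpa using h)
      · rw [pvE1_eqlen_ne x y a b (by simpa using h) hxy, if_neg hxy,
          ← pvMismatches_eq_zero a b (by simpa using h)]
        omega

-- the greedy one-skip comparison, structurally
def pvGreedy : List Char → List Char → Bool
  | _, [] => true
  | [], _ :: _ => true
  | x :: a, y :: b => if x = y then pvGreedy a b else a == y :: b

lemma pvSkipScan_eq_aux (a b : List Char) (hlen : a.length = b.length + 1) :
    ∀ (n i : Nat), b.length - i ≤ n → i ≤ b.length →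
      pvSkipScan a b i = pvGreedy (a.drop i) (b.drop i) := by
  intro n
  induction n with
  | zero =>
    intro i h hi
    have hib : i = b.length := by omega
    rw [pvSkipScan, if_neg (by omega)]
    have hbd : b.drop i = [] := by rw [hib]; exact List.drop_length
    rw [hbd]
    cases a.drop i <;> simp [pvGreedy]
  | succ n ih =>
    intro i h hi
    rw [pvSkipScan]
    by_cases hlt : i < b.length
    · rw [if_pos hlt]
      have hia : i < a.length := by omega
      have hdropa : a.drop i = a[i] :: a.drop (i + 1) := List.drop_eq_getElem_cons hia
      have hdropb : b.drop i = b[i] :: b.drop (i + 1) := List.drop_eq_getElem_cons hlt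
      rw [hdropa, hdropb, pvGreedy]
      rw [List.getD_eq_getElem a ' ' hia, List.getD_eq_getElem b ' ' hlt]
      by_cases heq : a[i] = b[i]
      · rw [if_neg (by simp [heq]), if_pos heq]
        exact ih (i + 1) (by omega) (by omega)
      · rw [if_pos (by simp [heq]), if_neg heq]
    · rw [if_neg hlt]
      have hib : i = b.length := by omega
      have hbd : b.drop i = [] := by rw [hib]; exact List.drop_length
      rw [hbd]
      cases a.drop i <;> simp [pvGreedy]

lemma pvGreedy_iff (a : List Char) : ∀ (b : List Char), a.length = b.length + 1 →
    (pvGreedy a b = true ↔ ∃ p c q, a = p ++ c :: q ∧ b = p ++ q) := by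
  induction a with
  | nil => intro b h; simp at h
  | cons x a ih =>
    intro b h
    cases b with
    | nil =>
      have ha : a = [] := List.length_eq_zero_iff.mp (by simpa using h)
      subst ha
      constructor
      · intro _; exact ⟨[], x, [], rfl, rfl⟩
      · intro _; simp [pvGreedy]
    | cons y b =>
      rw [pvGreedy]
      by_cases hxy : x = y
      · subst hxy
        rw [if_pos rfl, ih b (by simpa using h)]
        exact (pvDel_cons x a b).symm
      · rw [if_neg hxy]
        constructor
        · intro hbeq
          have hab : a = y :: b := by simpa using hbeq
          exact ⟨[], x, y :: b, by simp [hab], by simp⟩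
        · rintro ⟨p, c, q, h1, h2⟩
          cases p with
          | nil =>
            simp only [List.nil_append] at h1 h2
            injection h1 with _ hq1
            simp [hq1, ← h2]
          | cons z p' =>
            simp only [List.cons_append] at h1 h2
            injection h1 with he1 _
            injection h2 with he2 _
            exact absurd (he1.trans he2.symm) hxy

lemma pvSkipScan_iff (a b : List Char) (h : a.length = b.length + 1) :
    pvSkipScan a b 0 = true ↔ ∃ p c q, a = p ++ c :: q ∧ b = p ++ q := by
  rw [pvSkipScan_eq_aux a b h b.length 0 (by omega) (by omega)]
  simp only [List.drop_zero]
  exact pvGreedy_iff a b h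

lemma pvOneEdit_main (a b : List Char) (hba : b.length ≤ a.length) :
    pvOneEdit a b = true ↔ pvE1 a b := by
  unfold pvOneEdit
  rw [if_neg (by omega : ¬ a.length < b.length)]
  dsimp only
  by_cases hgap : b.length + 1 < a.length
  · rw [if_pos hgap]
    constructor
    · intro hc; exact absurd hc (by simp)
    · intro hE1; have := pvE1_len a b hE1; omega
  · rw [if_neg hgap]
    by_cases heq : a.length = b.length
    · rw [if_pos heq]
      simp only [decide_eq_true_eq]
      exact pvMismatches_iff a b heq
    · rw [if_neg heq]
      have hlen : a.length = b.length + 1 := by omega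
      rw [pvSkipScan_iff a b hlen]
      constructor
      · rintro ⟨p, c, q, h1, h2⟩
        right; right; left
        exact ⟨p, c, q, h1, h2⟩
      · rintro (hh | ⟨p, c, d, q, h1, h2⟩ | ⟨p, c, q, h1, h2⟩ | ⟨p, c, q, h1, h2⟩)
        · rw [hh] at hlen; omega
        · have l1 := congrArg List.length h1
          have l2 := congrArg List.length h2
          simp at l1 l2
          omega
        · exact ⟨p, c, q, h1, h2⟩
        · have l1 := congrArg List.length h1
          have l2 := congrArg List.length h2
          simp at l1 l2
          omega

lemma pvOneEdit_iff (a b : List Char) : pvOneEdit a b = true ↔ pvE1 a b := by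
  rcases Nat.lt_or_ge a.length b.length with hlt | hge
  · have hswap : pvOneEdit a b = pvOneEdit b a := by
      unfold pvOneEdit
      rw [if_pos hlt, if_neg (by omega : ¬ b.length < a.length)]
    rw [hswap, pvOneEdit_main b a (le_of_lt hlt), pvE1_swap]
  · exact pvOneEdit_main a b hge

lemma pvBridge (d p : List Char) :
    (pvLevenshtein d p ≤ 1) ↔ pvOneEdit d p = true := by
  rw [pvLev_le_one_iff, ← pvOneEdit_iff]

lemma pvLoop_eq (d : List Char) (ps : List String) :
    pvLoopA d ps = ps.find? (fun p => pvOneEdit d p.toList) := by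
  induction ps with
  | nil => simp [pvLoopA]
  | cons p ps ih =>
      by_cases h : pvLevenshtein d p.toList ≤ 1
      · simp [pvLoopA, h, List.find?, (pvBridge d p.toList).1 h]
      · have hb : pvOneEdit d p.toList = false := by
          rcases Bool.eq_false_or_eq_true (pvOneEdit d p.toList) with hb | hb
          · exact absurd ((pvBridge d p.toList).2 hb) h
          · exact hb
        simp [pvLoopA, h, List.find?, hb, ih]

-- ===== VERDICT (by name: the statement is the Claim_ definition above) =====
theorem get_typo_suggestion_spec : Claim_equal_get_typo_suggestion := by
  intro domain _
  show get_typo_suggestion domain = get_typo_suggestion_alt domain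
  unfold get_typo_suggestion get_typo_suggestion_alt
  simp only [pvLoop_eq]
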